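-- pv_equiv track=rewrite | github.com/wdotmathree/qr-code-generator | qr.py | int_alpha
-- ===== SOURCE A (Python) =====
-- def int_alpha(n):
--     if n == 0:
--         return 0
--     if n == 1:
--         return 0
--     ans = 0
--     while n != 1:
--         ans += 1
--         if n % 2 == 0:
--             n //= 2
--         else:
--             n = (n ^ 285) // 2
--     return ans
-- ===== SOURCE B (Python) =====
-- def int_alpha(n):
--     if n == 0 or n == 1:
--         return 0
--     x = 1
--     cnt = 0
--     while x != n:
--         cnt += 1
--         x = ((x << 1) ^ 285) if x & 0x80 else (x << 1)
--     return cnt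
-- ===== Notes on version B (the rewrite author's own statement) =====
-- stated objective: alternative
-- what changed: Replaces A's backward reduction loop (repeatedly dividing n by the generator via even/odd halving with 285-xor until it reaches 1) with a forward exponentiation loop that starts at 1 and multiplies by the generator (shift-left with 285 reduction on overflow) counting steps until it reaches n.
-- outside the precondition, e.g. on int_alpha(256): A returns 8, B does not finish within the time limit; on int_alpha(512): A returns 9, B does not finish within the time limit
import Mathlib
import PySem

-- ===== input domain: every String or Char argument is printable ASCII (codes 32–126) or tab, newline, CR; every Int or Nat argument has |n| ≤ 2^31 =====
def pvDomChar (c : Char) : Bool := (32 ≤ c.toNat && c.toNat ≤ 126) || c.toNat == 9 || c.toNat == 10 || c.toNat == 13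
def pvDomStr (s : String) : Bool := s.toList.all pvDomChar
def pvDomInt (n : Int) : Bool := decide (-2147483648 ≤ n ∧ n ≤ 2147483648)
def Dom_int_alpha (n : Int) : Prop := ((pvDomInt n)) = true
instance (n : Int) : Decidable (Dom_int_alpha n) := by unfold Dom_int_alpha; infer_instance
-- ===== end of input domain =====

-- B computes the same GF(256) discrete logarithm by forward exponentiation from 1 instead of A's backward reduction of n; equivalence proved on the field's domain 0..255.


-- ===== PORT A =====
-- A's while loop, with fuel making it total in Lean (512 > the 254 steps any admitted input needs;
-- the fuel is only a totality guard, the computation is A's step for step)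
def int_alphaLoop : Nat → Int → Int → Int
  | 0, _, ans => ans
  | fuel+1, n, ans =>
      if n ≠ 1 then
        int_alphaLoop fuel
          (if PySem.Int.mod n 2 = 0 then PySem.Int.floordiv n 2
           else PySem.Int.floordiv (PySem.Int.bxor n 285) 2)
          (ans + 1)
      else ans

def int_alpha (n : Int) : Int :=
  if n = 0 then 0
  else if n = 1 then 0
  else int_alphaLoop 512 n 0

-- ===== PORT B =====
-- B's while loop, same fuel-as-totality-guard
def int_alphaAltLoop (n : Int) : Nat → Int → Int → Int
  | 0, _, cnt => cnt
  | fuel+1, x, cnt =>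
      if x ≠ n then
        int_alphaAltLoop n fuel
          (if PySem.Int.band x 128 ≠ 0 then PySem.Int.bxor (x <<< (1:Nat)) 285 else x <<< (1:Nat))
          (cnt + 1)
      else cnt

def int_alpha_alt (n : Int) : Int :=
  if n = 0 ∨ n = 1 then 0
  else int_alphaAltLoop n 512 1 0

-- ===== PRECONDITION & SPEC =====
-- Pre_ restricts to GF(256)'s natural domain 0..255: outside it A diverges on most inputs, and where
-- it happens to terminate (e.g. n = 256 returns 8) that value is an artifact of its bit-level
-- reduction of a non-field-element; B's forward exponentiation loops forever there.
def Pre_int_alpha (n : Int) : Prop := 0 ≤ n ∧ n ≤ 255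
instance (n : Int) : Decidable (Pre_int_alpha n) := by unfold Pre_int_alpha; infer_instance
def pvWitness_int_alpha : Int := (3)
def Spec_int_alpha (n : Int) (out : Int) : Prop := out = int_alpha_alt n
instance (n : Int) (out : Int) : Decidable (Spec_int_alpha n out) := by unfold Spec_int_alpha; infer_instance

-- ===== CLAIM (what is proved, stated in full; the proofs are below) =====
def Claim_equal_int_alpha : Prop := ∀ (n : Int), Dom_int_alpha n → Pre_int_alpha n → Spec_int_alpha n (int_alpha n)

-- ===== LEMMAS AND PROOFS =====
set_option maxRecDepth 100000 in
set_option maxHeartbeats 4000000 in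
theorem int_alpha_key : ∀ m : Fin 256, int_alpha ((m : Nat) : Int) = int_alpha_alt ((m : Nat) : Int) := by
  decide

-- ===== VERDICT (by name: the statement is the Claim_ definition above) =====
theorem int_alpha_spec : Claim_equal_int_alpha := by
  intro n _ hpre
  unfold Spec_int_alpha
  obtain ⟨h0, h255⟩ := hpre
  have hn : n = ((n.toNat : Nat) : Int) := (Int.toNat_of_nonneg h0).symm
  have hlt : n.toNat < 256 := by omega
  rw [hn]
  exact int_alpha_key ⟨n.toNat, hlt⟩
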